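-- pv_equiv track=rewrite | github.com/kksusa/PTHN_DP_SMNR_6 | check_module.py | check_queen_cut
-- ===== SOURCE A (Python) =====
-- def check_queen_cut(pos_list):
--     for i in range(8):
--         for j in range(i + 1, 8):
--             if pos_list[i][0] == pos_list[j][0] or pos_list[i][1] == pos_list[j][1] or \
--                     pos_list[i][0] + pos_list[i][1] == pos_list[j][0] + pos_list[j][1] or \
--                     abs(pos_list[i][0] - pos_list[j][0]) == abs(pos_list[i][1] - pos_list[j][1]):
--                 return False
--     return True
-- ===== SOURCE B (Python) =====
-- def check_queen_cut(pos_list):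
--     rows, cols, diags, antis = set(), set(), set(), set()
--     for i in range(8):
--         r, c = pos_list[i][0], pos_list[i][1]
--         if r in rows or c in cols or r + c in diags or r - c in antis:
--             return False
--         rows.add(r)
--         cols.add(c)
--         diags.add(r + c)
--         antis.add(r - c)
--     return True
-- ===== Notes on version B (the rewrite author's own statement) =====
-- stated objective: alternative
-- what changed: Replaces the nested all-pairs comparison (28 pair checks with an abs-difference diagonal test) with a single pass over the 8 queens that maintains collision sets for rows, columns, diagonals (r+c) and anti-diagonals (r-c).
import Mathlib
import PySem

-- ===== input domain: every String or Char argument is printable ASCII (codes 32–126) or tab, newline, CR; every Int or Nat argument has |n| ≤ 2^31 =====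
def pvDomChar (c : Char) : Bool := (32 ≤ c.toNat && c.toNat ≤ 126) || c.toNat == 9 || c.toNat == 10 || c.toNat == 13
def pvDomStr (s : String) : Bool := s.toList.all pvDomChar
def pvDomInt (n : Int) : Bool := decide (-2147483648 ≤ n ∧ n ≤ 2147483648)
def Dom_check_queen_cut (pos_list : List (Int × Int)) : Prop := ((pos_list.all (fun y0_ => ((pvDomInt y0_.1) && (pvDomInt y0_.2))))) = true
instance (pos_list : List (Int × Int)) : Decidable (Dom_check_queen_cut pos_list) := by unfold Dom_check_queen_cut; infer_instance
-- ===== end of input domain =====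

-- B replaces A's nested all-pairs scan by a single pass over the 8 queens that
-- maintains collision sets for rows, columns, diagonals (r+c) and anti-diagonals (r-c).

-- ===== PORT A =====
-- pos_list[i] for i in 0..7; total form of the subscript, exact under Pre_ (all indices in range)
def pvGet (pos_list : List (Int × Int)) (i : Int) : Int × Int :=
  (PySem.List.pyGet? pos_list i).getD (0, 0)

-- the if-condition of A's inner loop, verbatim (abs via Int.natAbs)
def aPair (p q : Int × Int) : Bool :=
  p.1 == q.1 || p.2 == q.2 || p.1 + p.2 == q.1 + q.2 ||
    ((p.1 - q.1).natAbs == (p.2 - q.2).natAbs)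

-- nested 'for i in range(8): for j in range(i+1, 8): if …: return False' as
-- short-circuiting all over the ranges (early return False = some pair fails)
def check_queen_cut (pos_list : List (Int × Int)) : Bool :=
  (PySem.List.pyRange 0 8 1).all (fun i =>
    (PySem.List.pyRange (i + 1) 8 1).all (fun j =>
      !(aPair (pvGet pos_list i) (pvGet pos_list j))))

-- ===== PORT B =====
-- single pass of Source B: remaining indices, four collision sets; early return False
def bGo (pos_list : List (Int × Int)) (idxs : List Int)
    (rows cols diags antis : PySem.Set Int) : Bool :=
  match idxs with
  | [] => true
  | i :: rest =>
    let p := pvGet pos_list i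
    if rows.contains p.1 || cols.contains p.2 || diags.contains (p.1 + p.2)
        || antis.contains (p.1 - p.2) then false
    else bGo pos_list rest (rows.add p.1) (cols.add p.2)
        (diags.add (p.1 + p.2)) (antis.add (p.1 - p.2))

def check_queen_cut_alt (pos_list : List (Int × Int)) : Bool :=
  bGo pos_list (PySem.List.pyRange 0 8 1)
    PySem.Set.empty PySem.Set.empty PySem.Set.empty PySem.Set.empty

-- ===== PRECONDITION & SPEC =====
-- A raises IndexError iff the list has fewer than 8 positions AND no pair (0, j), j < len,
-- attacks (its scan checks all pairs with i = 0 first, so an early conflict returns False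
-- before the scan runs off the end); Pre_ is exactly A's returning set.
def Pre_check_queen_cut (pos_list : List (Int × Int)) : Prop :=
  8 ≤ pos_list.length ∨
    ∃ j < pos_list.length, 1 ≤ j ∧
      (let p := pos_list.getD 0 (0, 0)
       let q := pos_list.getD j (0, 0)
       p.1 = q.1 ∨ p.2 = q.2 ∨ p.1 + p.2 = q.1 + q.2 ∨
         (p.1 - q.1).natAbs = (p.2 - q.2).natAbs)
instance (pos_list : List (Int × Int)) : Decidable (Pre_check_queen_cut pos_list) := by
  unfold Pre_check_queen_cut; infer_instance

def pvWitness_check_queen_cut : (List (Int × Int)) :=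
  [(0, 0), (1, 2), (2, 4), (3, 6), (4, 1), (5, 3), (6, 5), (7, 7)]

def Spec_check_queen_cut (pos_list : List (Int × Int)) (out : Bool) : Prop := out = check_queen_cut_alt pos_list
instance (pos_list : List (Int × Int)) (out : Bool) : Decidable (Spec_check_queen_cut pos_list out) := by unfold Spec_check_queen_cut; infer_instance

-- ===== CLAIM (what is proved, stated in full; the proofs are below) =====
def Claim_equal_check_queen_cut : Prop := ∀ (pos_list : List (Int × Int)), Dom_check_queen_cut pos_list → Pre_check_queen_cut pos_list → Spec_check_queen_cut pos_list (check_queen_cut pos_list)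

-- ===== LEMMAS AND PROOFS =====

-- common characterisation of one attacking pair, as B's four collision keys
def conflict (p q : Int × Int) : Bool :=
  p.1 == q.1 || p.2 == q.2 || p.1 + p.2 == q.1 + q.2 || p.1 - p.2 == q.1 - q.2

theorem conflict_iff (p q : Int × Int) :
    conflict p q = true ↔
      p.1 = q.1 ∨ p.2 = q.2 ∨ p.1 + p.2 = q.1 + q.2 ∨ p.1 - p.2 = q.1 - q.2 := by
  simp [conflict]; tauto

theorem aPair_eq_conflict (p q : Int × Int) : aPair p q = conflict p q := by
  rw [Bool.eq_iff_iff]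
  simp only [aPair, conflict, Bool.or_eq_true, beq_iff_eq]
  omega

-- reference spec: no earlier queen attacks a later one
def noAtk : List (Int × Int) → Bool
  | [] => true
  | p :: l => l.all (fun q => !(conflict p q)) && noAtk l

-- B's pass, abstracted: 'seen' is the list of queens already placed
def noAtkFrom : List (Int × Int) → List (Int × Int) → Bool
  | _, [] => true
  | seen, p :: l => !(seen.any (fun q => conflict q p)) && noAtkFrom (p :: seen) l

theorem noAtkFrom_eq (l : List (Int × Int)) : ∀ seen : List (Int × Int),
    noAtkFrom seen l = ((l.all fun r => seen.all fun q => !(conflict q r)) && noAtk l) := by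
  induction l with
  | nil => intro seen; simp [noAtkFrom, noAtk]
  | cons p l ih =>
    intro seen
    rw [Bool.eq_iff_iff]
    simp only [noAtkFrom, noAtk, ih (p :: seen), Bool.and_eq_true, Bool.not_eq_true',
      List.all_cons, List.all_eq_true, List.any_eq_false, Bool.not_eq_true]
    constructor
    · rintro ⟨h1, h2, h3⟩
      refine ⟨⟨fun q hq => h1 q hq, fun r hr => (h2 r hr).2⟩, ⟨fun r hr => (h2 r hr).1, h3⟩⟩
    · rintro ⟨⟨h1, h2⟩, h3, h4⟩
      exact ⟨h1, fun r hr => ⟨h3 r hr, h2 r hr⟩, h4⟩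

-- A's nested loops compute noAtk of the indexed queens
theorem A_loop (pl : List (Int × Int)) (b : Int) : ∀ (n : Nat) (a : Int), b - a ≤ n →
    ((PySem.List.pyRange a b 1).all fun i =>
      (PySem.List.pyRange (i + 1) b 1).all fun j =>
        !(aPair (pvGet pl i) (pvGet pl j)))
    = noAtk ((PySem.List.pyRange a b 1).map (pvGet pl)) := by
  intro n
  induction n with
  | zero =>
    intro a ha
    have h : PySem.List.pyRange a b 1 = [] := by
      rw [PySem.List.pyRange_one]
      have : (b - a).toNat = 0 := by omega
      simp [this]
    simp [h, noAtk]
  | succ n ih =>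
    intro a ha
    by_cases hab : a < b
    · rw [PySem.List.pyRange_one_cons hab, List.all_cons, ih (a + 1) (by omega)]
      simp [noAtk, List.all_map, aPair_eq_conflict, Function.comp_def]
    · have h : PySem.List.pyRange a b 1 = [] := by
        rw [PySem.List.pyRange_one]
        have : (b - a).toNat = 0 := by omega
        simp [this]
      simp [h, noAtk]

-- B's pass computes noAtkFrom, given that the four sets hold exactly the seen keys
theorem B_loop (pl : List (Int × Int)) : ∀ (idxs : List Int) (seen : List (Int × Int))
    (rows cols diags antis : PySem.Set Int),
    (∀ x, rows.contains x = true ↔ ∃ q ∈ seen, q.1 = x) →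
    (∀ x, cols.contains x = true ↔ ∃ q ∈ seen, q.2 = x) →
    (∀ x, diags.contains x = true ↔ ∃ q ∈ seen, q.1 + q.2 = x) →
    (∀ x, antis.contains x = true ↔ ∃ q ∈ seen, q.1 - q.2 = x) →
    bGo pl idxs rows cols diags antis = noAtkFrom seen (idxs.map (pvGet pl)) := by
  intro idxs
  induction idxs with
  | nil => intro seen rows cols diags antis _ _ _ _; simp [bGo, noAtkFrom]
  | cons i rest ih =>
    intro seen rows cols diags antis hR hC hD hA
    simp only [bGo, List.map_cons, noAtkFrom]
    set p := pvGet pl i with hp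
    have hcond : (rows.contains p.1 || cols.contains p.2 || diags.contains (p.1 + p.2)
        || antis.contains (p.1 - p.2)) = seen.any (fun q => conflict q p) := by
      rw [Bool.eq_iff_iff]
      simp only [Bool.or_eq_true, hR, hC, hD, hA, List.any_eq_true, conflict_iff]
      constructor
      · rintro (((⟨q, hq, e⟩ | ⟨q, hq, e⟩) | ⟨q, hq, e⟩) | ⟨q, hq, e⟩)
        · exact ⟨q, hq, Or.inl e⟩
        · exact ⟨q, hq, Or.inr (Or.inl e)⟩
        · exact ⟨q, hq, Or.inr (Or.inr (Or.inl e))⟩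
        · exact ⟨q, hq, Or.inr (Or.inr (Or.inr e))⟩
      · rintro ⟨q, hq, (e | e | e | e)⟩
        · exact Or.inl (Or.inl (Or.inl ⟨q, hq, e⟩))
        · exact Or.inl (Or.inl (Or.inr ⟨q, hq, e⟩))
        · exact Or.inl (Or.inr ⟨q, hq, e⟩)
        · exact Or.inr ⟨q, hq, e⟩
    rw [hcond]
    by_cases hhit : seen.any (fun q => conflict q p) = true
    · simp [hhit]
    · simp only [Bool.not_eq_true] at hhit
      rw [if_neg (by rw [hhit]; simp), hhit]
      simp only [Bool.not_false, Bool.true_and]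
      apply ih (p :: seen)
      · intro x
        rw [show (rows.add p.1).contains x = true ↔ x ∈ rows.add p.1 from PySem.Set.contains_iff _ _,
          PySem.Set.mem_add]
        rw [← PySem.Set.contains_iff, hR]
        simp only [List.mem_cons]
        constructor
        · rintro (⟨q, hq, e⟩ | e)
          · exact ⟨q, Or.inr hq, e⟩
          · exact ⟨p, Or.inl rfl, e.symm⟩
        · rintro ⟨q, (rfl | hq), e⟩
          · exact Or.inr e.symm
          · exact Or.inl ⟨q, hq, e⟩
      · intro x
        rw [show (cols.add p.2).contains x = true ↔ x ∈ cols.add p.2 from PySem.Set.contains_iff _ _,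
          PySem.Set.mem_add]
        rw [← PySem.Set.contains_iff, hC]
        simp only [List.mem_cons]
        constructor
        · rintro (⟨q, hq, e⟩ | e)
          · exact ⟨q, Or.inr hq, e⟩
          · exact ⟨p, Or.inl rfl, e.symm⟩
        · rintro ⟨q, (rfl | hq), e⟩
          · exact Or.inr e.symm
          · exact Or.inl ⟨q, hq, e⟩
      · intro x
        rw [show (diags.add (p.1 + p.2)).contains x = true ↔ x ∈ diags.add (p.1 + p.2) from
          PySem.Set.contains_iff _ _, PySem.Set.mem_add]
        rw [← PySem.Set.contains_iff, hD]
        simp only [List.mem_cons]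
        constructor
        · rintro (⟨q, hq, e⟩ | e)
          · exact ⟨q, Or.inr hq, e⟩
          · exact ⟨p, Or.inl rfl, e.symm⟩
        · rintro ⟨q, (rfl | hq), e⟩
          · exact Or.inr e.symm
          · exact Or.inl ⟨q, hq, e⟩
      · intro x
        rw [show (antis.add (p.1 - p.2)).contains x = true ↔ x ∈ antis.add (p.1 - p.2) from
          PySem.Set.contains_iff _ _, PySem.Set.mem_add]
        rw [← PySem.Set.contains_iff, hA]
        simp only [List.mem_cons]
        constructor
        · rintro (⟨q, hq, e⟩ | e)
          · exact ⟨q, Or.inr hq, e⟩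
          · exact ⟨p, Or.inl rfl, e.symm⟩
        · rintro ⟨q, (rfl | hq), e⟩
          · exact Or.inr e.symm
          · exact Or.inl ⟨q, hq, e⟩

theorem alt_eq_noAtk (pl : List (Int × Int)) :
    check_queen_cut_alt pl = noAtk ((PySem.List.pyRange 0 8 1).map (pvGet pl)) := by
  rw [check_queen_cut_alt,
    B_loop pl _ [] _ _ _ _ (by intro x; rw [PySem.Set.contains_iff]; simp [PySem.Set.empty])
      (by intro x; rw [PySem.Set.contains_iff]; simp [PySem.Set.empty])
      (by intro x; rw [PySem.Set.contains_iff]; simp [PySem.Set.empty])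
      (by intro x; rw [PySem.Set.contains_iff]; simp [PySem.Set.empty]),
    noAtkFrom_eq]
  simp

-- ===== VERDICT (by name: the statement is the Claim_ definition above) =====
theorem check_queen_cut_spec : Claim_equal_check_queen_cut := by
  intro pl _ _
  unfold Spec_check_queen_cut
  rw [alt_eq_noAtk, check_queen_cut, A_loop pl 8 8 0 (by omega)]
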